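-- pv_equiv track=rewrite | github.com/jeremywaller/advent-of-code | 2024/08/solution.py | count_antinodes_withing_grid
-- ===== SOURCE A (Python) =====
-- def count_antinodes_withing_grid(grid, locations):
--     count = 0
--     for location in locations:
--         for i in range(len(grid)):
--             for j in range(len(grid[i])):
--                 if (i, j) == location:
--                     count += 1
--     return count
-- ===== SOURCE B (Python) =====
-- def count_antinodes_withing_grid(grid, locations):
--     rows = len(grid)
--     return sum(1 for i, j in locations
--                if 0 <= i < rows and 0 <= j < len(grid[i]))
-- ===== Notes on version B (the rewrite author's own statement) =====
-- stated objective: faster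
-- what changed: Instead of scanning every grid cell for every location, B checks each location once directly against the grid bounds (row count, then that row's length).
import Mathlib
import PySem

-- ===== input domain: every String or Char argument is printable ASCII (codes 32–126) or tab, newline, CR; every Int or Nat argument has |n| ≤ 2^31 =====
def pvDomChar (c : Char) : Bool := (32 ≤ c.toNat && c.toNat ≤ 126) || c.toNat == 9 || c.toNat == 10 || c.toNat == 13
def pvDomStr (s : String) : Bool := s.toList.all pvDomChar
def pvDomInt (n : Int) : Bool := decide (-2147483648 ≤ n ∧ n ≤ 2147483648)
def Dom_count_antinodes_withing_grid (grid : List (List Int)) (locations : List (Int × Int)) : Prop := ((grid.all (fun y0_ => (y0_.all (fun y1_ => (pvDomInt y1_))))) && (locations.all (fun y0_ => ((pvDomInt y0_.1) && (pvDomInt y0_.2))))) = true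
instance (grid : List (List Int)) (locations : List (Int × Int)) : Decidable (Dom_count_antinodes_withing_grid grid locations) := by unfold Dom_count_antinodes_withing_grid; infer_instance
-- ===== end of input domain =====

-- B replaces A's full scan of the grid per location by a direct per-location bounds check.

-- ===== PORT A =====
-- literal transliteration: for each location, scan all (i, j) cells and count matches
def count_antinodes_withing_grid (grid : List (List Int)) (locations : List (Int × Int)) : Int :=
  locations.foldl (fun count location =>
    (PySem.List.pyRange 0 (PySem.List.len grid) 1).foldl (fun count i =>
      (PySem.List.pyRange 0 (PySem.List.len (PySem.List.pyGetD grid i [])) 1).foldl (fun count j =>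
        if (i, j) = location then count + 1 else count) count) count) 0

-- ===== PORT B =====
-- sum(1 for i, j in locations if 0 <= i < rows and 0 <= j < len(grid[i]))
def count_antinodes_withing_grid_alt (grid : List (List Int)) (locations : List (Int × Int)) : Int :=
  ((locations.filter (fun p =>
      decide (0 ≤ p.1 ∧ p.1 < (grid.length : Int) ∧
              0 ≤ p.2 ∧ p.2 < ((PySem.List.pyGetD grid p.1 []).length : Int)))).length : Int)

-- ===== PRECONDITION & SPEC =====
def Spec_count_antinodes_withing_grid (grid : List (List Int)) (locations : List (Int × Int)) (out : Int) : Prop := out = count_antinodes_withing_grid_alt grid locations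
instance (grid : List (List Int)) (locations : List (Int × Int)) (out : Int) : Decidable (Spec_count_antinodes_withing_grid grid locations out) := by unfold Spec_count_antinodes_withing_grid; infer_instance

-- ===== CLAIM (what is proved, stated in full; the proofs are below) =====
def Claim_equal_count_antinodes_withing_grid : Prop := ∀ (grid : List (List Int)) (locations : List (Int × Int)), Dom_count_antinodes_withing_grid grid locations → Spec_count_antinodes_withing_grid grid locations (count_antinodes_withing_grid grid locations)

-- ===== LEMMAS AND PROOFS =====

-- the per-location predicate B tests
def pvInB (grid : List (List Int)) (p : Int × Int) : Bool :=
  decide (0 ≤ p.1 ∧ p.1 < (grid.length : Int) ∧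
          0 ≤ p.2 ∧ p.2 < ((PySem.List.pyGetD grid p.1 []).length : Int))

-- the innermost j-loop contributes 1 iff i is the location's row and its column is in range
lemma pv_inner_loop (i m : Int) (loc : Int × Int) (c : Int) :
    (PySem.List.pyRange 0 m 1).foldl
      (fun count j => if (i, j) = loc then count + 1 else count) c
    = c + (if i = loc.1 ∧ 0 ≤ loc.2 ∧ loc.2 < m then 1 else 0) := by
  rw [PySem.List.foldl_ite_add_one]
  congr 1
  by_cases h : i = loc.1 ∧ 0 ≤ loc.2 ∧ loc.2 < m
  · rw [if_pos h]
    have hcp : ((PySem.List.pyRange 0 m 1).countP fun j => decide ((i, j) = loc))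
        = (PySem.List.pyRange 0 m 1).count loc.2 := by
      apply List.countP_congr
      intro x _
      simp only [decide_eq_true_eq, beq_iff_eq, Prod.ext_iff]
      constructor
      · intro hx; exact hx.2
      · rintro rfl; exact ⟨h.1, rfl⟩
    rw [hcp, List.count_eq_one_of_mem (PySem.List.nodup_pyRange_one 0 m)
      (by rw [PySem.List.mem_pyRange_one]; exact ⟨h.2.1, h.2.2⟩)]
    exact Nat.cast_one
  · rw [if_neg h]
    have : ((PySem.List.pyRange 0 m 1).countP fun j => decide ((i, j) = loc)) = 0 := by
      rw [List.countP_eq_zero]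
      intro x hx
      rw [PySem.List.mem_pyRange_one] at hx
      simp only [decide_eq_true_eq, Prod.ext_iff]
      rintro ⟨h1, rfl⟩
      exact h ⟨h1, hx.1, hx.2⟩
    rw [this]; rfl

-- the full grid scan for one location contributes 1 iff the location is in bounds
lemma pv_grid_scan (grid : List (List Int)) (loc : Int × Int) (c : Int) :
    (PySem.List.pyRange 0 (PySem.List.len grid) 1).foldl (fun count i =>
      (PySem.List.pyRange 0 (PySem.List.len (PySem.List.pyGetD grid i [])) 1).foldl
        (fun count j => if (i, j) = loc then count + 1 else count) count) c
    = c + (if pvInB grid loc then 1 else 0) := by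
  rw [PySem.List.foldl_congr_mem _ _
    (fun count i => if i = loc.1 ∧ 0 ≤ loc.2 ∧
        loc.2 < PySem.List.len (PySem.List.pyGetD grid i []) then count + 1 else count) c
    (by
      intro acc x _
      rw [pv_inner_loop]
      beta_reduce
      split_ifs <;> omega)]
  rw [PySem.List.foldl_ite_add_one]
  congr 1
  by_cases h : pvInB grid loc
  · rw [if_pos h]
    obtain ⟨h1, h2, h3, h4⟩ := of_decide_eq_true h
    have hcp : ((PySem.List.pyRange 0 (PySem.List.len grid) 1).countP fun i =>
        decide (i = loc.1 ∧ 0 ≤ loc.2 ∧ loc.2 < PySem.List.len (PySem.List.pyGetD grid i [])))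
        = (PySem.List.pyRange 0 (PySem.List.len grid) 1).count loc.1 := by
      apply List.countP_congr
      intro x _
      simp only [decide_eq_true_eq, beq_iff_eq]
      constructor
      · intro hx; exact hx.1
      · rintro rfl
        exact ⟨rfl, h3, by simpa [PySem.List.len_eq] using h4⟩
    rw [hcp, List.count_eq_one_of_mem (PySem.List.nodup_pyRange_one 0 (PySem.List.len grid))
      (by rw [PySem.List.mem_pyRange_one, PySem.List.len_eq]; exact ⟨h1, h2⟩)]
    exact Nat.cast_one
  · rw [if_neg h]
    have : ((PySem.List.pyRange 0 (PySem.List.len grid) 1).countP fun i =>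
        decide (i = loc.1 ∧ 0 ≤ loc.2 ∧ loc.2 < PySem.List.len (PySem.List.pyGetD grid i []))) = 0 := by
      rw [List.countP_eq_zero]
      intro x hx
      rw [PySem.List.mem_pyRange_one, PySem.List.len_eq] at hx
      simp only [decide_eq_true_eq]
      rintro ⟨rfl, hj1, hj2⟩
      exact h (decide_eq_true ⟨hx.1, hx.2, hj1, by simpa [PySem.List.len_eq] using hj2⟩)
    rw [this]; rfl

-- ===== VERDICT (by name: the statement is the Claim_ definition above) =====
theorem count_antinodes_withing_grid_spec : Claim_equal_count_antinodes_withing_grid := by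
  intro grid locations hdom
  clear hdom
  show _ = _
  unfold count_antinodes_withing_grid count_antinodes_withing_grid_alt
  have : ∀ (c : Int),
      locations.foldl (fun count location =>
        (PySem.List.pyRange 0 (PySem.List.len grid) 1).foldl (fun count i =>
          (PySem.List.pyRange 0 (PySem.List.len (PySem.List.pyGetD grid i [])) 1).foldl
            (fun count j => if (i, j) = location then count + 1 else count) count) count) c
      = c + ((locations.filter (fun p =>
          decide (0 ≤ p.1 ∧ p.1 < (grid.length : Int) ∧
                  0 ≤ p.2 ∧ p.2 < ((PySem.List.pyGetD grid p.1 []).length : Int)))).length : Int) := by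
    intro c
    induction locations generalizing c with
    | nil => simp
    | cons hd tl ih =>
      rw [List.foldl_cons, ih, pv_grid_scan]
      rw [List.filter_cons]
      by_cases h : pvInB grid hd
      · rw [if_pos h, if_pos (by simpa [pvInB] using h)]
        push_cast [List.length_cons]; ring
      · rw [if_neg h, if_neg (by simpa [pvInB] using h)]
        ring
  simpa using this 0
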